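-- pv_equiv track=rewrite | github.com/Jingkzhou/urgs | sql-lineage-engine/utils/normalize.py | normalize_table_name
-- ===== SOURCE A (Python) =====
-- def normalize_table_name(name: str) -> str:
--     """
--     标准化表名，将 GSP 错误拆分的表名还原为正确格式
--
--     处理场景：
--     1. `G12_11`.``.`B` -> G12_11..B  (GSP 错误拆分)
--     2. `schema`.`table` -> schema.table  (正常带引号)
--     3. G12_11..B -> G12_11..B  (已正确，保持不变)
--     4. SMTMODS_L_ACCT_LOAN -> SMTMODS_L_ACCT_LOAN  (普通表名不变)
--
--     Args:
--         name: 原始表名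
--
--     Returns:
--         标准化后的表名
--     """
--     if not name:
--         return name
--
--     # 移除反引号
--     clean = name.replace('`', '')
--
--     # 如果没有反引号，直接返回（已经是标准格式或普通表名）
--     if clean == name:
--         return name
--
--     # 按 . 分割
--     parts = clean.split('.')
--
--     # 重组：处理空部分（代表原始的 ..）
--     result = []
--     for p in parts:
--         if p:
--             result.append(p)
--         elif result:  # 空部分且前面有内容，说明是 ..
--             result[-1] += '.'  # 追加点号到前一个部分
--
--     return '.'.join(result) if result else name
-- ===== SOURCE B (Python) =====
-- def normalize_table_name(name: str) -> str:
--     if not name: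
--         return name
--     clean = name.replace('`', '')
--     if clean == name:
--         return name
--     stripped = clean.lstrip('.')
--     return stripped if stripped else name
-- ===== Notes on version B (the rewrite author's own statement) =====
-- stated objective: simpler
-- what changed: B drops A's split-on-dot, part-reassembly loop and rejoin, replacing them with a single strip of the leading dot characters from the backtick-free string (falling back to the original name when that leaves nothing), which is exactly what A's loop computes.
import Mathlib
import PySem

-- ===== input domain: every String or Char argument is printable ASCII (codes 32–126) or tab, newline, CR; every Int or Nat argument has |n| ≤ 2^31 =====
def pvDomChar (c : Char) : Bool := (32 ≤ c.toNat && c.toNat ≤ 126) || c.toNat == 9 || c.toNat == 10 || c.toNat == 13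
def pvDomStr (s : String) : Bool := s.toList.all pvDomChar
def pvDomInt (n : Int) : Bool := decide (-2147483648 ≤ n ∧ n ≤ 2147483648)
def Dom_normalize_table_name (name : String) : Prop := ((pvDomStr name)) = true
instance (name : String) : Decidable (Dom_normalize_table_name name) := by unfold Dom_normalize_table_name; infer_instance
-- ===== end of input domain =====

-- B replaces A's split('.') + reassembly loop + join by a single lstrip('.') on the
-- backtick-free string (objective: simpler; same observable behaviour).


-- ===== PORT A =====
-- result[-1] += '.'  (append a dot to the last collected part)
def pvAppendDotLast : List (List Char) → List (List Char)
  | [] => []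
  | [r] => [r ++ ['.']]
  | r :: rs => r :: pvAppendDotLast rs

-- the body of A's `for p in parts` loop
def pvStep (result : List (List Char)) (p : List Char) : List (List Char) :=
  if p ≠ [] then result ++ [p]
  else if result ≠ [] then pvAppendDotLast result
  else result

def normalize_table_name (name : String) : String :=
  if name = "" then name
  else
    let clean := PySem.Chars.replace name.toList ['`'] []
    if clean = name.toList then name
    else
      let parts := PySem.Chars.splitOn clean ['.']
      let result := parts.foldl pvStep []
      if result ≠ [] then String.ofList (PySem.Chars.join ['.'] result) else name

-- ===== PORT B =====
def normalize_table_name_alt (name : String) : String :=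
  if name = "" then name
  else
    let clean := PySem.Chars.replace name.toList ['`'] []
    if clean = name.toList then name
    else
      -- clean.lstrip('.'): exact hand port — drop leading '.' characters
      let stripped := clean.dropWhile (· == '.')
      if stripped ≠ [] then String.ofList stripped else name

-- ===== PRECONDITION & SPEC =====
def Spec_normalize_table_name (name : String) (out : String) : Prop := out = normalize_table_name_alt name
instance (name : String) (out : String) : Decidable (Spec_normalize_table_name name out) := by unfold Spec_normalize_table_name; infer_instance

-- ===== CLAIM (what is proved, stated in full; the proofs are below) =====
def Claim_equal_normalize_table_name : Prop := ∀ (name : String), Dom_normalize_table_name name → Spec_normalize_table_name name (normalize_table_name name)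

-- ===== LEMMAS AND PROOFS =====

-- a simple structural model of splitting on '.'
def pvSplitDots : List Char → List Char → List (List Char)
  | [], cur => [cur.reverse]
  | c :: rest, cur => if c = '.' then cur.reverse :: pvSplitDots rest [] else pvSplitDots rest (c :: cur)

lemma pvSplitDots_cons_dot (rest cur : List Char) :
    pvSplitDots ('.' :: rest) cur = cur.reverse :: pvSplitDots rest [] := by
  simp [pvSplitDots]

lemma pvSplitDots_cons_ne (rest cur : List Char) (c : Char) (hc : c ≠ '.') :
    pvSplitDots (c :: rest) cur = pvSplitDots rest (c :: cur) := by
  simp [pvSplitDots, hc]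

lemma pvJoin_nil : PySem.Chars.join ['.'] [] = [] := by
  simp [PySem.Chars.join, List.intercalate]

lemma pvJoin_singleton (x : List Char) : PySem.Chars.join ['.'] [x] = x := by
  simp [PySem.Chars.join, List.intercalate]

lemma pvJoin_cons_cons (x y : List Char) (l : List (List Char)) :
    PySem.Chars.join ['.'] (x :: y :: l) = x ++ '.' :: PySem.Chars.join ['.'] (y :: l) := by
  simp [PySem.Chars.join, List.intercalate]

lemma pvGo_spec : ∀ (fuel : Nat) (l cur : List Char) (acc : List (List Char)),
    l.length ≤ fuel →
    PySem.Chars.splitOn.go ['.'] fuel l cur acc = acc.reverse ++ pvSplitDots l cur := by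
  intro fuel
  induction fuel with
  | zero =>
    intro l cur acc h
    have : l = [] := by cases l <;> simp_all
    subst this
    simp [PySem.Chars.splitOn.go, pvSplitDots]
  | succ n ih =>
    intro l cur acc h
    cases l with
    | nil => simp [PySem.Chars.splitOn.go, pvSplitDots]
    | cons c rest =>
      have hlen : rest.length ≤ n := by simpa using Nat.le_of_succ_le_succ h
      by_cases hc : c = '.'
      · subst hc
        rw [PySem.Chars.splitOn.go]
        split_ifs with hif
        · have hdrop : List.drop (['.'] : List Char).length ('.' :: rest) = rest := rfl
          rw [hdrop, ih rest [] _ hlen, pvSplitDots_cons_dot]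
          simp
        · simp [List.isPrefixOf] at hif
      · rw [PySem.Chars.splitOn.go]
        split_ifs with hif
        · exfalso
          simp [List.isPrefixOf, beq_iff_eq] at hif
          first
            | exact hc hif
            | exact hc hif.symm
        · rw [ih rest (c :: cur) acc hlen, pvSplitDots_cons_ne rest cur c hc]

lemma pvSplitOn_eq (cs : List Char) :
    PySem.Chars.splitOn cs ['.'] = pvSplitDots cs [] := by
  unfold PySem.Chars.splitOn
  simpa using pvGo_spec (cs.length + 1) cs [] [] (by omega)

lemma pvSplitDots_ne_nil (l cur : List Char) : pvSplitDots l cur ≠ [] := by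
  induction l generalizing cur with
  | nil => simp [pvSplitDots]
  | cons c rest ih => by_cases hc : c = '.' <;> simp [pvSplitDots, hc, ih]

lemma pvJoin_split : ∀ (l cur : List Char),
    PySem.Chars.join ['.'] (pvSplitDots l cur) = cur.reverse ++ l := by
  intro l
  induction l with
  | nil => intro cur; simp [pvSplitDots]
  | cons c rest ih =>
    intro cur
    by_cases hc : c = '.'
    · subst hc
      rw [pvSplitDots_cons_dot]
      obtain ⟨y, ys, hy⟩ := List.exists_cons_of_ne_nil (pvSplitDots_ne_nil rest [])
      rw [hy, pvJoin_cons_cons, ← hy, ih []]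
      simp
    · rw [pvSplitDots_cons_ne rest cur c hc, ih (c :: cur)]
      simp

lemma pvSplitDots_dotfree : ∀ (l cur : List Char), '.' ∉ cur →
    ∀ p ∈ pvSplitDots l cur, '.' ∉ p := by
  intro l
  induction l with
  | nil =>
    intro cur hcur
    simpa [pvSplitDots] using hcur
  | cons c rest ih =>
    intro cur hcur
    by_cases hc : c = '.'
    · subst hc
      rw [pvSplitDots_cons_dot]
      intro p hp
      rcases List.mem_cons.1 hp with hp | hp
      · subst hp; simpa using hcur
      · exact ih [] (by simp) p hp
    · rw [pvSplitDots_cons_ne rest cur c hc]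
      exact ih (c :: cur) (by simp [hcur, Ne.symm hc])

lemma pvAppendDotLast_join : ∀ (acc : List (List Char)), acc ≠ [] →
    PySem.Chars.join ['.'] (pvAppendDotLast acc) = PySem.Chars.join ['.'] acc ++ ['.'] := by
  intro acc
  induction acc with
  | nil => intro h; simp at h
  | cons r rs ih =>
    intro _
    cases rs with
    | nil => simp [pvAppendDotLast]
    | cons s ss =>
      rw [show pvAppendDotLast (r :: s :: ss) = r :: pvAppendDotLast (s :: ss) from rfl]
      obtain ⟨y, ys, hy⟩ := List.exists_cons_of_ne_nil (show pvAppendDotLast (s :: ss) ≠ [] by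
        cases ss <;> simp [pvAppendDotLast])
      rw [hy, pvJoin_cons_cons, ← hy, ih (by simp), pvJoin_cons_cons]
      simp

lemma pvAppendDotLast_ne_nil (acc : List (List Char)) (h : acc ≠ []) :
    pvAppendDotLast acc ≠ [] := by
  cases acc with
  | nil => simp at h
  | cons r rs => cases rs <;> simp [pvAppendDotLast]

lemma pvAppendDotLast_nonempty : ∀ (acc : List (List Char)), (∀ r ∈ acc, r ≠ []) →
    ∀ r ∈ pvAppendDotLast acc, r ≠ [] := by
  intro acc
  induction acc with
  | nil => intro _; simp [pvAppendDotLast]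
  | cons r rs ih =>
    intro h
    cases rs with
    | nil => simp [pvAppendDotLast]
    | cons s ss =>
      intro q hq
      rw [show pvAppendDotLast (r :: s :: ss) = r :: pvAppendDotLast (s :: ss) from rfl] at hq
      rcases List.mem_cons.1 hq with hq | hq
      · subst hq; exact h q (by simp)
      · exact ih (fun x hx => h x (List.mem_cons_of_mem r hx)) q hq

lemma pvJoin_append_singleton (p : List Char) : ∀ (acc : List (List Char)), acc ≠ [] →
    PySem.Chars.join ['.'] (acc ++ [p]) = PySem.Chars.join ['.'] acc ++ '.' :: p := by
  intro acc
  induction acc with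
  | nil => intro h; simp at h
  | cons y ys ih =>
    intro _
    cases ys with
    | nil =>
      rw [show ([y] : List (List Char)) ++ [p] = [y, p] from rfl, pvJoin_cons_cons,
        pvJoin_singleton, pvJoin_singleton]
    | cons z zs =>
      obtain ⟨w, ws, hw⟩ := List.exists_cons_of_ne_nil (show (z :: zs) ++ [p] ≠ [] by simp)
      rw [List.cons_append, hw, pvJoin_cons_cons, ← hw, ih (by simp), pvJoin_cons_cons]
      simp

lemma pvStep_ne_nil (acc : List (List Char)) (p : List Char) (h : acc ≠ []) :
    pvStep acc p ≠ [] := by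
  unfold pvStep
  split_ifs with h1
  · simp
  · exact pvAppendDotLast_ne_nil acc h

lemma pvStep_join (acc : List (List Char)) (p : List Char) (h : acc ≠ []) :
    PySem.Chars.join ['.'] (pvStep acc p) = PySem.Chars.join ['.'] acc ++ '.' :: p := by
  unfold pvStep
  rcases eq_or_ne p [] with hp | hp
  · subst hp
    rw [if_neg (by simp), if_pos h]
    simpa using pvAppendDotLast_join acc h
  · rw [if_pos hp]
    exact pvJoin_append_singleton p acc h

lemma pvFoldl_nonempty : ∀ (pieces acc : List (List Char)), (∀ r ∈ acc, r ≠ []) →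
    ∀ r ∈ pieces.foldl pvStep acc, r ≠ [] := by
  intro pieces
  induction pieces with
  | nil => intro acc h; simpa using h
  | cons p rest ih =>
    intro acc h
    rw [List.foldl_cons]
    refine ih (pvStep acc p) ?_
    unfold pvStep
    split_ifs with h1 h2
    · intro r hr
      rcases List.mem_append.1 hr with hr | hr
      · exact h r hr
      · have hrp : r = p := by simpa using hr
        exact hrp ▸ h1
    · exact pvAppendDotLast_nonempty acc h
    · exact h

lemma pvFoldl_join : ∀ (pieces : List (List Char)) (acc : List (List Char)), acc ≠ [] →
    PySem.Chars.join ['.'] (pieces.foldl pvStep acc)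
      = PySem.Chars.join ['.'] acc ++ (pieces.map (fun p => '.' :: p)).flatten := by
  intro pieces
  induction pieces with
  | nil => intro acc _; simp
  | cons p rest ih =>
    intro acc h
    rw [List.foldl_cons, ih (pvStep acc p) (pvStep_ne_nil acc p h), pvStep_join acc p h]
    simp

lemma pvJoin_cons (x : List Char) (rest : List (List Char)) :
    PySem.Chars.join ['.'] (x :: rest) = x ++ (rest.map (fun p => '.' :: p)).flatten := by
  induction rest generalizing x with
  | nil => simp
  | cons y ys ih =>
    rw [pvJoin_cons_cons, ih y]
    simp

-- A's loop on the split pieces produces exactly the dot-lstripped join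
lemma pvLoop_eq : ∀ (pieces : List (List Char)), (∀ p ∈ pieces, '.' ∉ p) →
    PySem.Chars.join ['.'] (pieces.foldl pvStep [])
      = (PySem.Chars.join ['.'] pieces).dropWhile (· == '.') := by
  intro pieces
  induction pieces with
  | nil => intro _; simp
  | cons p rest ih =>
    intro hdf
    cases p with
    | nil =>
      rw [List.foldl_cons, show pvStep [] [] = [] from rfl,
        ih (fun q hq => hdf q (List.mem_cons_of_mem _ hq))]
      cases rest with
      | nil => simp
      | cons y ys =>
        rw [pvJoin_cons_cons]
        simp
    | cons c cp =>
      have hc : c ≠ '.' := fun hceq => (hdf (c :: cp) (by simp)) (by simp [hceq])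
      rw [List.foldl_cons, show pvStep [] (c :: cp) = [c :: cp] from rfl,
        pvFoldl_join rest [c :: cp] (by simp),
        show PySem.Chars.join ['.'] ((c :: cp) :: rest)
          = (c :: cp) ++ (rest.map (fun p => '.' :: p)).flatten from pvJoin_cons _ _,
        pvJoin_singleton, List.cons_append, List.dropWhile_cons]
      simp [hc]

lemma pvJoin_eq_nil (res : List (List Char)) (h : ∀ r ∈ res, r ≠ [])
    (hj : PySem.Chars.join ['.'] res = []) : res = [] := by
  cases res with
  | nil => rfl
  | cons r rs =>
    exfalso
    have hr : r ≠ [] := h r (by simp)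
    cases rs with
    | nil =>
      rw [pvJoin_singleton] at hj
      exact hr hj
    | cons s ss =>
      rw [pvJoin_cons_cons] at hj
      simp at hj

-- the inner computations agree for every backtick-free character list
lemma pvCore (clean : List Char) (name : String) :
    (if (PySem.Chars.splitOn clean ['.']).foldl pvStep [] ≠ [] then
        String.ofList (PySem.Chars.join ['.'] ((PySem.Chars.splitOn clean ['.']).foldl pvStep []))
      else name)
    = (if clean.dropWhile (· == '.') ≠ [] then String.ofList (clean.dropWhile (· == '.')) else name) := by
  have hdf : ∀ p ∈ PySem.Chars.splitOn clean ['.'], '.' ∉ p := by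
    rw [pvSplitOn_eq]
    exact pvSplitDots_dotfree clean [] (by simp)
  have hjoin : PySem.Chars.join ['.'] (PySem.Chars.splitOn clean ['.']) = clean := by
    rw [pvSplitOn_eq]
    simpa using pvJoin_split clean []
  have hmain : PySem.Chars.join ['.'] ((PySem.Chars.splitOn clean ['.']).foldl pvStep [])
      = clean.dropWhile (· == '.') := by
    rw [pvLoop_eq _ hdf, hjoin]
  have hnonempty := pvFoldl_nonempty (PySem.Chars.splitOn clean ['.']) [] (by simp)
  by_cases hres : (PySem.Chars.splitOn clean ['.']).foldl pvStep [] = []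
  · have hstr : clean.dropWhile (· == '.') = [] := by
      rw [← hmain, hres, pvJoin_nil]
    simp [hres, hstr]
  · have hstr : clean.dropWhile (· == '.') ≠ [] := by
      intro h0
      exact hres (pvJoin_eq_nil _ hnonempty (by rw [hmain, h0]))
    simp [hres, hstr, hmain]

-- ===== VERDICT (by name: the statement is the Claim_ definition above) =====
theorem normalize_table_name_spec : Claim_equal_normalize_table_name := by
  intro name _
  unfold Spec_normalize_table_name normalize_table_name normalize_table_name_alt
  by_cases h0 : name = ""
  · simp [h0]
  · simp only [h0, if_false]
    by_cases h1 : PySem.Chars.replace name.toList ['`'] [] = name.toList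
    · simp [h1]
    · simp only [h1, if_false]
      exact pvCore (PySem.Chars.replace name.toList ['`'] []) name
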